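-- pv_equiv track=rewrite | github.com/JanKazimir/Market_Watch_Agent | src/pdf_diff.py | _match_tables
-- ===== SOURCE A (Python) =====
-- def _table_signature(table: list[list[str]]) -> str:
--     """Simple fingerprint: first row joined. Helps match tables across versions."""
--     if not table:
--         return ""
--     return "|".join(table[0])
--
-- def _match_tables(
--     old_tables: list[list[list[str]]],
--     new_tables: list[list[list[str]]],
-- ) -> list[tuple[int | None, int | None]]:
--     """Match old tables to new tables by header similarity, then by position.
--
--     Returns list of (old_index | None, new_index | None) pairs.
--     None on either side means added or removed.
--     """
--     matched_old = set()
--     matched_new = set()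
--     pairs = []
--
--     # Pass 1: match by identical header row
--     old_sigs = {i: _table_signature(t) for i, t in enumerate(old_tables)}
--     new_sigs = {i: _table_signature(t) for i, t in enumerate(new_tables)}
--
--     for oi, osig in old_sigs.items():
--         if not osig:
--             continue
--         for ni, nsig in new_sigs.items():
--             if ni in matched_new:
--                 continue
--             if osig == nsig:
--                 pairs.append((oi, ni))
--                 matched_old.add(oi)
--                 matched_new.add(ni)
--                 break
--
--     # Pass 2: match remaining by position order
--     remaining_old = [i for i in range(len(old_tables)) if i not in matched_old]
--     remaining_new = [i for i in range(len(new_tables)) if i not in matched_new]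
--
--     for oi, ni in zip(remaining_old, remaining_new):
--         pairs.append((oi, ni))
--         matched_old.add(oi)
--         matched_new.add(ni)
--
--     # Leftovers
--     for oi in range(len(old_tables)):
--         if oi not in matched_old:
--             pairs.append((oi, None))
--     for ni in range(len(new_tables)):
--         if ni not in matched_new:
--             pairs.append((None, ni))
--
--     return pairs
-- ===== SOURCE B (Python) =====
-- from collections import defaultdict, deque
--
--
-- def _table_signature(table: list[list[str]]) -> str:
--     if not table:
--         return ""
--     return "|".join(table[0])
--
--
-- def _match_tables(
--     old_tables: list[list[list[str]]],
--     new_tables: list[list[list[str]]],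
-- ) -> list[tuple[int | None, int | None]]:
--     """Match by identical header signature via a signature->index queue, then by position."""
--     # One pass over new_tables: bucket the new indices per signature (in index order).
--     buckets = defaultdict(deque)
--     for ni, t in enumerate(new_tables):
--         buckets[_table_signature(t)].append(ni)
--
--     pairs = []
--     matched_new = set()
--     unmatched_old = []
--     # One pass over old_tables: pop the lowest still-queued new index with the same signature.
--     for oi, t in enumerate(old_tables):
--         sig = _table_signature(t)
--         if sig and buckets[sig]:
--             ni = buckets[sig].popleft()
--             matched_new.add(ni)
--             pairs.append((oi, ni))
--         else:
--             unmatched_old.append(oi)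
--
--     remaining_new = [ni for ni in range(len(new_tables)) if ni not in matched_new]
--     k = min(len(unmatched_old), len(remaining_new))
--     pairs.extend(zip(unmatched_old, remaining_new))
--     pairs.extend((oi, None) for oi in unmatched_old[k:])
--     pairs.extend((None, ni) for ni in remaining_new[k:])
--     return pairs
-- ===== Notes on version B (the rewrite author's own statement) =====
-- stated objective: alternative
-- what changed: A scans all new tables for every old table and re-derives leftovers by re-filtering index ranges against membership sets; B buckets new-table indices per header signature in one pass and pops the lowest queued index per old table, collecting unmatched old indices as it goes (intended to avoid the nested scan; a timing run measured only ~1.2x, so no speed is claimed).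
import Mathlib
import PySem

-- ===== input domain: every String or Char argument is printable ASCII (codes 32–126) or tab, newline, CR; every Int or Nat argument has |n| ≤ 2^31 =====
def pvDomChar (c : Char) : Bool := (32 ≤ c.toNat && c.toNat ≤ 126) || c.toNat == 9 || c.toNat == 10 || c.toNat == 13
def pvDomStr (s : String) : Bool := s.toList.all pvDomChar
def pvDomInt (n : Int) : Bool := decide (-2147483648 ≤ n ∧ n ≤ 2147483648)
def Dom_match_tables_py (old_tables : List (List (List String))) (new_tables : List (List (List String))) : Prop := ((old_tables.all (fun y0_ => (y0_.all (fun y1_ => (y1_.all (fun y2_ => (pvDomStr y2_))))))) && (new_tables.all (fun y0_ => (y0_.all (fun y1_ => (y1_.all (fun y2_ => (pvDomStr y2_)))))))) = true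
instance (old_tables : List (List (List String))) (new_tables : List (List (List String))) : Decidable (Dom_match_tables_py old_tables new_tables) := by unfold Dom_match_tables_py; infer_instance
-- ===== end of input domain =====

-- B replaces A's scan-per-old-table with a signature→index-queue built in one pass over new_tables (objective: alternative; timing run did not confirm a speed-up).


-- ===== PORT A =====
-- _table_signature
def tableSig (table : List (List String)) : String :=
  match table with
  | [] => ""
  | r :: _ => PySem.Str.join "|" r

-- A's inner 'for ni, nsig in new_sigs.items(): … break' loop
def findFirstA (newSigs : List (Int × String)) (matchedNew : PySem.Set Int) (osig : String) : Option Int :=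
  match newSigs with
  | [] => none
  | (ni, nsig) :: rest =>
    if PySem.Set.contains matchedNew ni then findFirstA rest matchedNew osig
    else if osig = nsig then some ni
    else findFirstA rest matchedNew osig

-- pass-1 loop body (state: pairs, matched_old, matched_new)
def stepA1 (newSigs : List (Int × String))
    (st : List (Option Int × Option Int) × PySem.Set Int × PySem.Set Int) (p : Int × String) :
    List (Option Int × Option Int) × PySem.Set Int × PySem.Set Int :=
  if p.2 = "" then st
  else match findFirstA newSigs st.2.2 p.2 with
    | none => st
    | some ni => (st.1 ++ [(some p.1, some ni)], PySem.Set.add st.2.1 p.1, PySem.Set.add st.2.2 ni)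

-- pass-2 loop body (zip of the two remaining lists)
def stepA2 (st : List (Option Int × Option Int) × PySem.Set Int × PySem.Set Int) (q : Int × Int) :
    List (Option Int × Option Int) × PySem.Set Int × PySem.Set Int :=
  (st.1 ++ [(some q.1, some q.2)], PySem.Set.add st.2.1 q.1, PySem.Set.add st.2.2 q.2)

def match_tables_py (old_tables : List (List (List String))) (new_tables : List (List (List String))) : List (Option Int × Option Int) :=
  -- old_sigs / new_sigs: dict comprehensions over enumerate, keys distinct → assoc list in order
  let oldSigs : List (Int × String) := (PySem.List.enumerate old_tables).map (fun p => (p.1, tableSig p.2))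
  let newSigs : List (Int × String) := (PySem.List.enumerate new_tables).map (fun p => (p.1, tableSig p.2))
  -- Pass 1
  let st1 := oldSigs.foldl (stepA1 newSigs) ([], PySem.Set.empty, PySem.Set.empty)
  -- Pass 2
  let remainingOld := (PySem.List.pyRange 0 (PySem.List.len old_tables) 1).filter (fun i => !(PySem.Set.contains st1.2.1 i))
  let remainingNew := (PySem.List.pyRange 0 (PySem.List.len new_tables) 1).filter (fun i => !(PySem.Set.contains st1.2.2 i))
  let st2 := (remainingOld.zip remainingNew).foldl stepA2 st1
  -- Leftovers
  let pairs3 := (PySem.List.pyRange 0 (PySem.List.len old_tables) 1).foldl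
    (fun acc oi => if !(PySem.Set.contains st2.2.1 oi) then acc ++ [(some oi, (none : Option Int))] else acc) st2.1
  (PySem.List.pyRange 0 (PySem.List.len new_tables) 1).foldl
    (fun acc ni => if !(PySem.Set.contains st2.2.2 ni) then acc ++ [((none : Option Int), some ni)] else acc) pairs3

-- ===== PORT B =====
-- buckets: defaultdict(deque); one pass over new_tables
def bucketsB (new_tables : List (List (List String))) : PySem.Dict String (List Int) :=
  (PySem.List.enumerate new_tables).foldl
    (fun d p => d.modify (tableSig p.2) [] (fun q => q ++ [p.1])) PySem.Dict.empty

-- B's single pass over old_tables: pop the queue front, or record oi as unmatched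
def stepB (st : PySem.Dict String (List Int) × List (Option Int × Option Int) × PySem.Set Int × List Int)
    (p : Int × List (List String)) :
    PySem.Dict String (List Int) × List (Option Int × Option Int) × PySem.Set Int × List Int :=
  let sig := tableSig p.2
  if sig = "" then (st.1, st.2.1, st.2.2.1, st.2.2.2 ++ [p.1])
  else
    match st.1.getD sig [] with
    | [] => (st.1, st.2.1, st.2.2.1, st.2.2.2 ++ [p.1])
    | ni :: rest => (st.1.insert sig rest, st.2.1 ++ [(some p.1, some ni)], PySem.Set.add st.2.2.1 ni, st.2.2.2)

def pass1B (old_tables : List (List (List String))) (buckets0 : PySem.Dict String (List Int)) :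
    PySem.Dict String (List Int) × List (Option Int × Option Int) × PySem.Set Int × List Int :=
  (PySem.List.enumerate old_tables).foldl stepB (buckets0, [], PySem.Set.empty, [])

def match_tables_py_alt (old_tables : List (List (List String))) (new_tables : List (List (List String))) : List (Option Int × Option Int) :=
  let st := pass1B old_tables (bucketsB new_tables)
  let pairs := st.2.1
  let mn := st.2.2.1
  let uo := st.2.2.2
  let remainingNew := (PySem.List.pyRange 0 (PySem.List.len new_tables) 1).filter (fun ni => !(PySem.Set.contains mn ni))
  let k := min uo.length remainingNew.length
  pairs ++ (uo.zip remainingNew).map (fun q => (some q.1, some q.2))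
        ++ (uo.drop k).map (fun oi => (some oi, (none : Option Int)))
        ++ (remainingNew.drop k).map (fun ni => ((none : Option Int), some ni))

-- ===== PRECONDITION & SPEC =====
def Spec_match_tables_py (old_tables : List (List (List String))) (new_tables : List (List (List String))) (out : List (Option Int × Option Int)) : Prop := out = match_tables_py_alt old_tables new_tables
instance (old_tables : List (List (List String))) (new_tables : List (List (List String))) (out : List (Option Int × Option Int)) : Decidable (Spec_match_tables_py old_tables new_tables out) := by unfold Spec_match_tables_py; infer_instance

-- ===== CLAIM (what is proved, stated in full; the proofs are below) =====
def Claim_equal_match_tables_py : Prop := ∀ (old_tables : List (List (List String))) (new_tables : List (List (List String))), Dom_match_tables_py old_tables new_tables → Spec_match_tables_py old_tables new_tables (match_tables_py old_tables new_tables)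

-- ===== LEMMAS AND PROOFS =====

-- the indices still available for signature s, in order (proof-only abstraction)
def avail (ns : List (Int × String)) (mn : PySem.Set Int) (s : String) : List Int :=
  (ns.filter (fun q => decide (q.2 = s) && !(PySem.Set.contains mn q.1))).map (fun q => q.1)

theorem findFirstA_eq_head_avail (ns : List (Int × String)) (mn : PySem.Set Int) (s : String) :
    findFirstA ns mn s = (avail ns mn s).head? := by
  induction ns with
  | nil => simp [findFirstA, avail]
  | cons q rest ih =>
    obtain ⟨ni, nsig⟩ := q
    by_cases hc : ni ∈ mn
    · simp [findFirstA, avail, hc] at ih ⊢; exact ih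
    · by_cases he : s = nsig
      · simp [findFirstA, avail, hc, he]
      · have hne : ¬ (nsig = s) := fun h => he h.symm
        simp [findFirstA, avail, hc, he, hne] at ih ⊢; exact ih

-- proof-only fold abbreviations: A's pass-1 fold pulled back over enumerate, and B's pass-1 fold
def foldA (ns : List (Int × String)) (os : List (Int × List (List String)))
    (st : List (Option Int × Option Int) × PySem.Set Int × PySem.Set Int) :
    List (Option Int × Option Int) × PySem.Set Int × PySem.Set Int :=
  os.foldl (fun st p => stepA1 ns st (p.1, tableSig p.2)) st

def foldB (os : List (Int × List (List String)))
    (st : PySem.Dict String (List Int) × List (Option Int × Option Int) × PySem.Set Int × List Int) :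
    PySem.Dict String (List Int) × List (Option Int × Option Int) × PySem.Set Int × List Int :=
  os.foldl stepB st

-- step-shape lemmas
theorem stepA1_empty (ns : List (Int × String)) (st) (oi : Int) (s : String) (hs : s = "") :
    stepA1 ns st (oi, s) = st := by simp [stepA1, hs]

theorem stepA1_none (ns : List (Int × String)) (st) (oi : Int) (s : String) (hs : ¬ s = "")
    (h : findFirstA ns st.2.2 s = none) : stepA1 ns st (oi, s) = st := by
  simp [stepA1, hs, h]

theorem stepA1_some (ns : List (Int × String)) (st) (oi : Int) (s : String) (hs : ¬ s = "")
    (ni : Int) (h : findFirstA ns st.2.2 s = some ni) :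
    stepA1 ns st (oi, s) = (st.1 ++ [(some oi, some ni)], PySem.Set.add st.2.1 oi, PySem.Set.add st.2.2 ni) := by
  simp [stepA1, hs, h]

theorem stepB_empty (st) (p : Int × List (List String)) (hs : tableSig p.2 = "") :
    stepB st p = (st.1, st.2.1, st.2.2.1, st.2.2.2 ++ [p.1]) := by simp [stepB, hs]

theorem stepB_nil (st) (p : Int × List (List String)) (hs : ¬ tableSig p.2 = "")
    (h : st.1.getD (tableSig p.2) [] = []) :
    stepB st p = (st.1, st.2.1, st.2.2.1, st.2.2.2 ++ [p.1]) := by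
  simp [stepB, hs, h]

theorem stepB_cons (st) (p : Int × List (List String)) (hs : ¬ tableSig p.2 = "")
    (ni : Int) (rest : List Int) (h : st.1.getD (tableSig p.2) [] = ni :: rest) :
    stepB st p = (st.1.insert (tableSig p.2) rest, st.2.1 ++ [(some p.1, some ni)],
                  PySem.Set.add st.2.2.1 ni, st.2.2.2) := by
  simp [stepB, hs, h]

-- membership / availability lemmas
theorem mem_avail (ns : List (Int × String)) (mn : PySem.Set Int) (s : String) (ni : Int)
    (h : ni ∈ avail ns mn s) : ∃ q ∈ ns, q.1 = ni ∧ q.2 = s := by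
  unfold avail at h
  simp only [List.mem_map, List.mem_filter, Bool.and_eq_true, decide_eq_true_eq] at h
  obtain ⟨q, ⟨hq, hsq, _⟩, hfq⟩ := h
  exact ⟨q, hq, hfq, hsq⟩

theorem avail_add_of_ne (ns : List (Int × String)) (mn : PySem.Set Int) (s' : String) (ni : Int)
    (h : ∀ q ∈ ns, q.2 = s' → q.1 ≠ ni) :
    avail ns (PySem.Set.add mn ni) s' = avail ns mn s' := by
  unfold avail
  congr 1
  apply List.filter_congr
  intro q hq
  by_cases hs : q.2 = s'
  · simp [hs, PySem.Set.mem_add, h q hq hs]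
  · simp [hs]

theorem avail_head_tail (ns : List (Int × String)) (mn : PySem.Set Int) (s : String)
    (ni : Int) (rest : List Int) (hpw : ns.Pairwise (fun a b => a.1 ≠ b.1))
    (h : avail ns mn s = ni :: rest) :
    avail ns (PySem.Set.add mn ni) s = rest := by
  induction ns with
  | nil => simp [avail] at h
  | cons q t ih =>
    have hq := (List.pairwise_cons.mp hpw).1
    have hpt := (List.pairwise_cons.mp hpw).2
    by_cases hsq : q.2 = s
    · by_cases hcm : q.1 ∈ mn
      · have h' : avail t mn s = ni :: rest := by
          unfold avail at h ⊢
          rw [List.filter_cons, if_neg (by simp [hsq, hcm])] at h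
          exact h
        have := ih hpt h'
        unfold avail at this ⊢
        rw [List.filter_cons, if_neg (by simp [hsq, PySem.Set.mem_add, hcm])]
        exact this
      · have hq1 : q.1 = ni ∧ avail t mn s = rest := by
          unfold avail at h
          rw [List.filter_cons, if_pos (by simp [hsq, hcm])] at h
          simp only [List.map_cons, List.cons_eq_cons] at h
          exact ⟨h.1, h.2⟩
        have hcong : avail t (PySem.Set.add mn ni) s = avail t mn s := by
          apply avail_add_of_ne
          intro q' hq' _ hq'e
          exact (hq q' hq') (by rw [hq1.1, hq'e])
        unfold avail at hcong ⊢
        rw [List.filter_cons, if_neg (by simp [PySem.Set.mem_add, hq1.1])]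
        rw [hcong]
        exact hq1.2
    · have h' : avail t mn s = ni :: rest := by
        unfold avail at h ⊢
        rw [List.filter_cons, if_neg (by simp [hsq])] at h
        exact h
      have := ih hpt h'
      unfold avail at this ⊢
      rw [List.filter_cons, if_neg (by simp [hsq])]
      exact this

theorem avail_other (ns : List (Int × String)) (mn : PySem.Set Int) (s s' : String)
    (ni : Int) (rest : List Int) (hpw : ns.Pairwise (fun a b => a.1 ≠ b.1))
    (h : avail ns mn s = ni :: rest) (hne : s' ≠ s) :
    avail ns (PySem.Set.add mn ni) s' = avail ns mn s' := by
  have hmem : ni ∈ avail ns mn s := by rw [h]; exact List.mem_cons_self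
  obtain ⟨q0, hq0, hf0, hs0⟩ := mem_avail ns mn s ni hmem
  apply avail_add_of_ne
  intro q hq hqs hqe
  have hqq0 : q ≠ q0 := by
    intro he
    apply hne
    rw [← hqs, he, hs0]
  have hsym : Symmetric (fun (a b : Int × String) => a.1 ≠ b.1) := fun {a b} h hba => h hba.symm
  exact (List.Pairwise.forall hsym hpw hq hq0 hqq0) (hqe.trans hf0.symm)

-- nodup helper: the head of the suffix is fresh
theorem fresh_of_nodup {α : Type} (d t : List α) (x : α) (h : (d ++ x :: t).Nodup) :
    x ∉ d ∧ x ∉ t := by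
  rw [List.nodup_append] at h
  obtain ⟨_, h2, h3⟩ := h
  exact ⟨fun hx => h3 x hx x List.mem_cons_self rfl, (List.nodup_cons.mp h2).1⟩

-- main pass-1 invariant: B's bucket/unmatched-list pass simulates A's scan pass
theorem pass_main (ns : List (Int × String)) (hpw : ns.Pairwise (fun a b => a.1 ≠ b.1))
    (os : List (Int × List (List String))) :
    ∀ (done : List (Int × List (List String))) (pairs : List (Option Int × Option Int))
      (mo mn : PySem.Set Int) (bk : PySem.Dict String (List Int)) (uo : List Int),
    ((done ++ os).map Prod.fst).Nodup →
    (∀ s, ¬ s = "" → bk.getD s [] = avail ns mn s) →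
    uo = (done.map Prod.fst).filter (fun i => !(PySem.Set.contains mo i)) →
    (∀ i, i ∈ mo → i ∈ done.map Prod.fst) →
    (foldB os (bk, pairs, mn, uo)).2.1 = (foldA ns os (pairs, mo, mn)).1 ∧
    (foldB os (bk, pairs, mn, uo)).2.2.1 = (foldA ns os (pairs, mo, mn)).2.2 ∧
    (foldB os (bk, pairs, mn, uo)).2.2.2 =
      ((done ++ os).map Prod.fst).filter (fun i => !(PySem.Set.contains (foldA ns os (pairs, mo, mn)).2.1 i)) ∧
    (∀ i, i ∈ (foldA ns os (pairs, mo, mn)).2.1 → i ∈ (done ++ os).map Prod.fst) := by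
  induction os with
  | nil =>
    intro done pairs mo mn bk uo hnd hbk huo hmo
    refine ⟨rfl, rfl, ?_, ?_⟩
    · simpa using huo
    · simpa using hmo
  | cons p os ih =>
    intro done pairs mo mn bk uo hnd hbk huo hmo
    have hassoc : done ++ p :: os = (done ++ [p]) ++ os := by simp
    have hfresh : p.1 ∉ done.map Prod.fst ∧ p.1 ∉ os.map Prod.fst := by
      have := hnd
      rw [List.map_append, List.map_cons] at this
      exact fresh_of_nodup _ _ _ this
    have hnd' : (((done ++ [p]) ++ os).map Prod.fst).Nodup := by rw [← hassoc]; exact hnd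
    have hBstep : foldB (p :: os) (bk, pairs, mn, uo) = foldB os (stepB (bk, pairs, mn, uo) p) := rfl
    have hAstep : foldA ns (p :: os) (pairs, mo, mn) =
        foldA ns os (stepA1 ns (pairs, mo, mn) (p.1, tableSig p.2)) := rfl
    by_cases hsig : tableSig p.2 = ""
    · -- unmatched by empty signature
      rw [hBstep, hAstep, stepB_empty _ _ hsig, stepA1_empty _ _ _ _ hsig]
      rw [hassoc]
      apply ih (done ++ [p]) pairs mo mn bk (uo ++ [p.1]) hnd' hbk ?_ ?_
      · have hpm : p.1 ∉ mo := fun hm => hfresh.1 (hmo p.1 hm)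
        rw [List.map_append, List.filter_append, ← huo]
        simp [hpm]
      · intro i hi
        rw [List.map_append]
        exact List.mem_append_left _ (hmo i hi)
    · rcases hav : avail ns mn (tableSig p.2) with _ | ⟨ni, rest⟩
      · -- no available new table with this signature
        have hget : bk.getD (tableSig p.2) [] = [] := by rw [hbk _ hsig, hav]
        have hfind : findFirstA ns mn (tableSig p.2) = none := by
          rw [findFirstA_eq_head_avail, hav]; rfl
        rw [hBstep, hAstep, stepB_nil _ _ hsig hget, stepA1_none _ _ _ _ hsig (by exact hfind)]
        rw [hassoc]
        apply ih (done ++ [p]) pairs mo mn bk (uo ++ [p.1]) hnd' hbk ?_ ?_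
        · have hpm : p.1 ∉ mo := fun hm => hfresh.1 (hmo p.1 hm)
          rw [List.map_append, List.filter_append, ← huo]
          simp [hpm]
        · intro i hi
          rw [List.map_append]
          exact List.mem_append_left _ (hmo i hi)
      · -- matched: A finds ni by scanning, B pops it from the bucket
        have hget : bk.getD (tableSig p.2) [] = ni :: rest := by rw [hbk _ hsig, hav]
        have hfind : findFirstA ns mn (tableSig p.2) = some ni := by
          rw [findFirstA_eq_head_avail, hav]; rfl
        rw [hBstep, hAstep, stepB_cons _ _ hsig _ _ hget, stepA1_some _ _ _ _ hsig _ (by exact hfind)]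
        rw [hassoc]
        apply ih (done ++ [p]) (pairs ++ [(some p.1, some ni)]) (PySem.Set.add mo p.1)
          (PySem.Set.add mn ni) (bk.insert (tableSig p.2) rest) uo hnd' ?_ ?_ ?_
        · intro s hs
          by_cases hss : s = tableSig p.2
          · rw [hss, PySem.Dict.getD_insert_self]
            exact (avail_head_tail ns mn _ ni rest hpw hav).symm
          · rw [PySem.Dict.getD_insert_of_ne _ _ _ hss, hbk s hs]
            exact (avail_other ns mn _ s ni rest hpw hav hss).symm
        · have hcong : (done.map Prod.fst).filter (fun i => !(PySem.Set.contains (PySem.Set.add mo p.1) i)) =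
              (done.map Prod.fst).filter (fun i => !(PySem.Set.contains mo i)) := by
            apply List.filter_congr
            intro i hi
            have hip : i ≠ p.1 := fun he => hfresh.1 (he ▸ hi)
            simp [PySem.Set.mem_add, hip]
          rw [List.map_append, List.filter_append, hcong, ← huo]
          simp [PySem.Set.mem_add]
        · intro i hi
          rw [List.map_append]
          rcases (PySem.Set.mem_add _ _ _).mp hi with h | h
          · exact List.mem_append_left _ (hmo i h)
          · simp [h]

-- B's bucket construction yields exactly the available-indices lists
theorem bucketsB_getD (new_tables : List (List (List String))) (s : String) :
    (bucketsB new_tables).getD s [] =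
      avail ((PySem.List.enumerate new_tables).map (fun p => (p.1, tableSig p.2))) PySem.Set.empty s := by
  unfold bucketsB avail
  have hfold : (PySem.List.enumerate new_tables).foldl
      (fun d p => d.modify (tableSig p.2) [] (fun q => q ++ [p.1])) PySem.Dict.empty =
      ((PySem.List.enumerate new_tables).map (fun p => (tableSig p.2, p.1))).foldl
      (fun d q => d.modify q.1 [] (fun l => l ++ [q.2])) PySem.Dict.empty := by
    rw [List.foldl_map]
  rw [hfold, PySem.Dict.getD_foldl_modify_append]
  rw [List.filter_map, List.filter_map, List.map_map, List.map_map]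
  simp only [PySem.Dict.getD_empty, List.nil_append]
  apply congrArg
  apply List.filter_congr
  intro p _
  simp [Function.comp, beq_eq_decide]

-- pass 2 of A: appending the zipped pairs and updating both matched sets
theorem pass2_eq (zs : List (Int × Int)) :
    ∀ (pairs : List (Option Int × Option Int)) (mo mn : PySem.Set Int),
    zs.foldl stepA2 (pairs, mo, mn) =
      (pairs ++ zs.map (fun q => ((some q.1 : Option Int), (some q.2 : Option Int))),
       PySem.Set.update mo (zs.map Prod.fst), PySem.Set.update mn (zs.map Prod.snd)) := by
  induction zs with
  | nil => intro pairs mo mn; simp [PySem.Set.update]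
  | cons z zs ih =>
    intro pairs mo mn
    simp only [List.foldl_cons, List.map_cons]
    rw [show stepA2 (pairs, mo, mn) z =
      (pairs ++ [(some z.1, some z.2)], PySem.Set.add mo z.1, PySem.Set.add mn z.2) from rfl]
    rw [ih, PySem.Set.update_cons, PySem.Set.update_cons]
    simp

theorem zip_map_fst (l1 l2 : List Int) : (l1.zip l2).map Prod.fst = l1.take l2.length := by
  induction l1 generalizing l2 with
  | nil => simp
  | cons x t ih => cases l2 with
    | nil => simp
    | cons y t2 => simp [ih]

theorem zip_map_snd (l1 l2 : List Int) : (l1.zip l2).map Prod.snd = l2.take l1.length := by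
  induction l1 generalizing l2 with
  | nil => simp
  | cons x t ih => cases l2 with
    | nil => simp
    | cons y t2 => simp [ih]

theorem take_eq_take_min (l : List Int) (n : Nat) : l.take n = l.take (min l.length n) := by
  rcases le_total l.length n with h | h
  · rw [List.take_of_length_le h, List.take_of_length_le (by simp [h])]
  · rw [min_eq_right h]

theorem filter_not_mem_take (l : List Int) (k : Nat) (h : l.Nodup) :
    l.filter (fun x => decide (x ∉ l.take k)) = l.drop k := by
  induction l generalizing k with
  | nil => simp
  | cons x t ih =>
    cases k with
    | zero => simp
    | succ k =>
      simp only [List.take_succ_cons, List.drop_succ_cons, List.filter_cons]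
      have hx : x ∉ t := (List.nodup_cons.mp h).1
      rw [if_neg (by simp)]
      rw [List.filter_congr (q := fun y => decide (y ∉ t.take k)) ?_]
      · exact ih k (List.nodup_cons.mp h).2
      · intro y hy
        have : y ≠ x := fun he => hx (he ▸ hy)
        simp [this]

-- turning the leftover filters over the updated sets into drops of the remaining lists
theorem filter_update_take (R : List Int) (m : PySem.Set Int) (k : Nat)
    (hnd : R.Nodup) :
    R.filter (fun i => !(PySem.Set.contains (PySem.Set.update m ((R.filter (fun i => !(PySem.Set.contains m i))).take k)) i)) =
      (R.filter (fun i => !(PySem.Set.contains m i))).drop k := by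
  set rem := R.filter (fun i => !(PySem.Set.contains m i)) with hrem
  have hcong : R.filter (fun i => !(PySem.Set.contains (PySem.Set.update m (rem.take k)) i)) =
      R.filter (fun i => (!(PySem.Set.contains m i)) && decide (i ∉ rem.take k)) := by
    apply List.filter_congr
    intro i _
    by_cases h1 : i ∈ m
    · simp [PySem.Set.mem_update, h1]
    · by_cases h2 : i ∈ rem.take k
      · simp [PySem.Set.mem_update, h1, h2]
      · simp [PySem.Set.mem_update, h1, h2]
  rw [hcong]
  have hsplit : R.filter (fun i => (!(PySem.Set.contains m i)) && decide (i ∉ rem.take k)) =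
      rem.filter (fun i => decide (i ∉ rem.take k)) := by
    rw [hrem, List.filter_filter]
    apply List.filter_congr
    intro i _
    exact Bool.and_comm _ _
  rw [hsplit]
  exact filter_not_mem_take rem k (hnd.filter _)

theorem match_tables_py_spec : Claim_equal_match_tables_py := by
  intro old_tables new_tables _hdom
  unfold Spec_match_tables_py
  have hpw : ((PySem.List.enumerate new_tables).map (fun p => (p.1, tableSig p.2))).Pairwise
      (fun (a b : Int × String) => a.1 ≠ b.1) := by
    apply List.pairwise_map.mpr
    exact (PySem.List.pairwise_lt_enumerate new_tables 0).imp (fun h => Int.ne_of_lt h)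
  have hfst_old : (PySem.List.enumerate old_tables).map Prod.fst
      = PySem.List.pyRange 0 (PySem.List.len old_tables) 1 := by
    simp [PySem.List.map_fst_enumerate, PySem.List.len_eq]
  have hnd : ((([] : List (Int × List (List String))) ++ PySem.List.enumerate old_tables).map Prod.fst).Nodup := by
    rw [List.nil_append, hfst_old]; exact PySem.List.nodup_pyRange_one _ _
  have hmain := pass_main _ hpw (PySem.List.enumerate old_tables) [] [] PySem.Set.empty
      PySem.Set.empty (bucketsB new_tables) [] hnd
      (fun s _ => bucketsB_getD new_tables s) (by simp)
      (by intro i hi; simp [PySem.Set.empty] at hi)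
  obtain ⟨e1, e2, e3, _⟩ := hmain
  rw [List.nil_append, hfst_old] at e3
  simp only [match_tables_py, match_tables_py_alt, pass1B]
  simp only [foldB] at e1 e2 e3
  have hA : List.foldl (stepA1 ((PySem.List.enumerate new_tables).map (fun p => (p.1, tableSig p.2))))
      ([], PySem.Set.empty, PySem.Set.empty)
      ((PySem.List.enumerate old_tables).map (fun p => (p.1, tableSig p.2))) =
      foldA ((PySem.List.enumerate new_tables).map (fun p => (p.1, tableSig p.2)))
        (PySem.List.enumerate old_tables) ([], PySem.Set.empty, PySem.Set.empty) := by
    rw [foldA, List.foldl_map]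
  rw [hA]
  set P1 := foldA ((PySem.List.enumerate new_tables).map (fun p => (p.1, tableSig p.2)))
      (PySem.List.enumerate old_tables) ([], PySem.Set.empty, PySem.Set.empty) with hP1
  rw [e1, e2, e3]
  rw [pass2_eq]
  rw [PySem.List.foldl_append_if, PySem.List.foldl_append_if]
  rw [zip_map_fst, zip_map_snd]
  rw [take_eq_take_min
      ((PySem.List.pyRange 0 (PySem.List.len old_tables) 1).filter (fun i => !(PySem.Set.contains P1.2.1 i)))
      ((PySem.List.pyRange 0 (PySem.List.len new_tables) 1).filter (fun i => !(PySem.Set.contains P1.2.2 i))).length]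
  rw [take_eq_take_min
      ((PySem.List.pyRange 0 (PySem.List.len new_tables) 1).filter (fun i => !(PySem.Set.contains P1.2.2 i)))
      ((PySem.List.pyRange 0 (PySem.List.len old_tables) 1).filter (fun i => !(PySem.Set.contains P1.2.1 i))).length]
  rw [filter_update_take (PySem.List.pyRange 0 (PySem.List.len old_tables) 1) P1.2.1 _
      (PySem.List.nodup_pyRange_one _ _)]
  rw [filter_update_take (PySem.List.pyRange 0 (PySem.List.len new_tables) 1) P1.2.2 _
      (PySem.List.nodup_pyRange_one _ _)]
  rw [Nat.min_comm
      ((PySem.List.pyRange 0 (PySem.List.len new_tables) 1).filter (fun i => !(PySem.Set.contains P1.2.2 i))).length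
      ((PySem.List.pyRange 0 (PySem.List.len old_tables) 1).filter (fun i => !(PySem.Set.contains P1.2.1 i))).length]
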